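-- pv_equiv track=rewrite | github.com/Bilalhdi/pdf-ocr-parser | txt2json.py | clean_embedded_newlines
-- ===== SOURCE A (Python) =====
-- def clean_embedded_newlines(raw: str) -> str:
--     """
--     Remove actual newline characters only inside JSON string literals.
--     """
--     result = []
--     in_string = False
--     escape = False
--
--     for c in raw:
--         if escape:
--             result.append(c)
--             escape = False
--         elif c == '\\':
--             result.append(c)
--             escape = True
--         elif c == '"':
--             result.append(c)
--             in_string = not in_string
--         elif in_string and c in ('\n', '\r'):
--             # Skip actual newlines inside quoted strings
--             continue
--         else:
--             result.append(c)
--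
--     return "".join(result)
-- ===== SOURCE B (Python) =====
-- def clean_embedded_newlines(raw: str) -> str:
--     """Segment scanner: consume escape pairs and quotes as tokens, and copy
--     maximal runs free of backslashes/quotes wholesale, filtering newlines
--     from runs that lie inside a string literal."""
--     out = []
--     inside = False
--     i = 0
--     n = len(raw)
--     while i < n:
--         c = raw[i]
--         if c == '\\':
--             out.append(raw[i:i + 2])  # keep the escape pair (or lone trailing backslash)
--             i += 2
--         elif c == '"':
--             out.append('"')
--             inside = not inside
--             i += 1
--         else:
--             j = i
--             while j < n and raw[j] not in '\\"':
--                 j += 1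
--             seg = raw[i:j]
--             if inside:
--                 seg = ''.join(ch for ch in seg if ch not in '\n\r')
--             out.append(seg)
--             i = j
--     return ''.join(out)
-- ===== Notes on version B (the rewrite author's own statement) =====
-- stated objective: alternative
-- what changed: Replaced A's per-character state machine with a per-character escape flag by a segment scanner that consumes escape pairs and quotes as whole tokens and copies maximal backslash/quote-free runs in one step, filtering newlines from runs inside string literals.
import Mathlib
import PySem

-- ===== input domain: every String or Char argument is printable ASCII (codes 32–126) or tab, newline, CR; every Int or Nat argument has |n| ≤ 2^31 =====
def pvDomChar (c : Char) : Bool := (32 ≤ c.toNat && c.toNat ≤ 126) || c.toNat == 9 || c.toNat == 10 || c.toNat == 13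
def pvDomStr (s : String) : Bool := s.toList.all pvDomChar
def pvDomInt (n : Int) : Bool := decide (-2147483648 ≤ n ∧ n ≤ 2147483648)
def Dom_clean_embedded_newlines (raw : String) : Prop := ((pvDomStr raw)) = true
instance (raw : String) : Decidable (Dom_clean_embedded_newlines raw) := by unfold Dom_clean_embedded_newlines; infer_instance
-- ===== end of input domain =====

-- B replaces A's per-character escape state machine with a segment scanner that copies
-- maximal backslash/quote-free runs wholesale (objective: alternative, same cost).


-- ===== PORT A =====
-- A's loop over characters with (in_string, escape) state; result accumulated as the output list.
def pvAGo (ins : Bool) (esc : Bool) : List Char → List Char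
  | [] => []
  | c :: t =>
    if esc then c :: pvAGo ins false t
    else if c = '\\' then c :: pvAGo ins true t
    else if c = '"' then c :: pvAGo (!ins) false t
    else if ins && (c = '\n' || c = '\r') then pvAGo ins false t
    else c :: pvAGo ins false t

def clean_embedded_newlines (raw : String) : String :=
  String.ofList (pvAGo false false raw.toList)

-- ===== PORT B =====
-- B's segment scanner: escape pair / quote / maximal run free of '\' and '"',
-- the run filtered of newlines when inside a string literal.
def pvRunChar (c : Char) : Bool := c != '\\' && c != '"'

def pvBGo (ins : Bool) : List Char → List Char
  | [] => []
  | c :: t =>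
    if c = '\\' then
      match t with
      | [] => ['\\']
      | d :: t' => '\\' :: d :: pvBGo ins t'
    else if c = '"' then '"' :: pvBGo (!ins) t
    else
      let run := (c :: t).takeWhile pvRunChar
      let rest := (c :: t).dropWhile pvRunChar
      (if ins then run.filter (fun x => x != '\n' && x != '\r') else run) ++ pvBGo ins rest
termination_by l => l.length
decreasing_by
  · simp
  · simp
  · have hc : pvRunChar c = true := by
      simp [pvRunChar]; exact ⟨by simpa using ‹¬ c = '\\'›, by simpa using ‹¬ c = '"'›⟩
    simp [List.dropWhile, hc]
    have := List.length_dropWhile_le pvRunChar t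
    omega
def clean_embedded_newlines_alt (raw : String) : String :=
  String.ofList (pvBGo false raw.toList)

-- ===== PRECONDITION & SPEC =====
def Spec_clean_embedded_newlines (raw : String) (out : String) : Prop := out = clean_embedded_newlines_alt raw
instance (raw : String) (out : String) : Decidable (Spec_clean_embedded_newlines raw out) := by unfold Spec_clean_embedded_newlines; infer_instance

-- ===== CLAIM (what is proved, stated in full; the proofs are below) =====
def Claim_equal_clean_embedded_newlines : Prop := ∀ (raw : String), Dom_clean_embedded_newlines raw → Spec_clean_embedded_newlines raw (clean_embedded_newlines raw)

-- ===== LEMMAS AND PROOFS =====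

-- A run of characters that are neither '\' nor '"' is emitted by A as the run itself
-- (newlines filtered when inside a string), after which A continues unchanged.
lemma pvA_run (ins : Bool) (run rest : List Char)
    (h : ∀ c ∈ run, pvRunChar c = true) :
    pvAGo ins false (run ++ rest) =
      (if ins then run.filter (fun x => x != '\n' && x != '\r') else run) ++ pvAGo ins false rest := by
  induction run with
  | nil => simp
  | cons c t ih =>
    have hc := h c (by simp)
    have h1 : ¬ c = '\\' := by simp [pvRunChar] at hc; simpa using hc.1
    have h2 : ¬ c = '"' := by simp [pvRunChar] at hc; simpa using hc.2
    have ih' := ih (fun x hx => h x (by simp [hx]))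
    cases ins with
    | false =>
      simp only [List.cons_append, pvAGo, if_neg h1, if_neg h2]
      simp [ih']
    | true =>
      by_cases hnl : c = '\n' ∨ c = '\r'
      · simp only [List.cons_append, pvAGo, if_neg h1, if_neg h2]
        have : (true && (c = '\n' || c = '\r')) = true := by
          rcases hnl with h | h <;> simp [h]
        rw [if_pos this, ih']
        have : (c != '\n' && c != '\r') = false := by
          rcases hnl with h | h <;> simp [h]
        simp [this]
      · rw [not_or] at hnl
        simp only [List.cons_append, pvAGo, if_neg h1, if_neg h2]
        have hb : (true && (c = '\n' || c = '\r')) = false := by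
          simp [hnl.1, hnl.2]
        rw [if_neg (by simp)]
        rw [ih']
        have hk : (c != '\n' && c != '\r') = true := by simp [hnl.1, hnl.2]
        simp [hk, hnl.1, hnl.2]

lemma pvB_eq_pvA : ∀ (ins : Bool) (l : List Char), pvBGo ins l = pvAGo ins false l := by
  intro ins l
  induction ins, l using pvBGo.induct with
  | case1 ins => simp [pvBGo, pvAGo]
  | case2 ins => simp [pvBGo, pvAGo]
  | case3 ins c t ih => simp [pvBGo, pvAGo, ih]
  | case4 ins t h ih => rw [pvBGo.eq_def]; simp [pvAGo, ih]
  | case5 ins c t h1 h2 rest ih =>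
      rw [pvBGo.eq_def]
      dsimp only
      rw [if_neg h1, if_neg h2]
      have hmem : ∀ x ∈ (c :: t).takeWhile pvRunChar, pvRunChar x = true :=
        fun x hx => List.mem_takeWhile_imp hx
      rw [ih]
      conv_rhs => rw [show (c :: t) = (c :: t).takeWhile pvRunChar ++ (c :: t).dropWhile pvRunChar from
        (List.takeWhile_append_dropWhile).symm]
      exact (pvA_run ins _ _ hmem).symm

-- ===== VERDICT (by name: the statement is the Claim_ definition above) =====
theorem clean_embedded_newlines_spec : Claim_equal_clean_embedded_newlines := by
  intro raw _
  unfold Spec_clean_embedded_newlines clean_embedded_newlines clean_embedded_newlines_alt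
  rw [pvB_eq_pvA]
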